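-- pv_equiv track=rewrite | github.com/xavgru12/svn-to-git-migration | output/external_checker.py | find_smallest_int
-- ===== SOURCE A (Python) =====
-- def find_smallest_int(pairs):
--     """Finds the smallest integer among string and integer pairs.
--
--     Args:
--         pairs: A list of tuples, where each tuple contains a string and an integer.
--
--     Returns:
--         The smallest integer found in the pairs, or None if no integers are found.
--     """
--
--     smallest_int = None
--     for branch_without_sub, branch_with_sub, number in pairs:
--         if isinstance(number, int) and (
--             smallest_int is None or number < smallest_int
--         ):
--             smallest_int = number
--             branch_without_sub_smallest_int = branch_without_sub
--             branch_with_sub_smallest_int = branch_with_sub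
--     if smallest_int is None:
--         breakpoint()
--         raise ValueError("parsing all branches finds nothing")
--
--     return (
--         branch_without_sub_smallest_int,
--         branch_with_sub_smallest_int,
--         smallest_int,
--     )
-- ===== SOURCE B (Python) =====
-- def find_smallest_int(pairs):
--     candidates = [(a, b, n) for a, b, n in pairs if isinstance(n, int)]
--     if not candidates:
--         breakpoint()
--         raise ValueError("parsing all branches finds nothing")
--     return min(candidates, key=lambda t: t[2])
-- ===== Notes on version B (the rewrite author's own statement) =====
-- stated objective: idiomatic
-- what changed: Replaces the hand-rolled accumulator loop (optional running minimum plus two parallel 'best so far' variables) with a filtering comprehension followed by the built-in min with a key, whose first-wins rule matches A's strict-< update.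
import Mathlib
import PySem

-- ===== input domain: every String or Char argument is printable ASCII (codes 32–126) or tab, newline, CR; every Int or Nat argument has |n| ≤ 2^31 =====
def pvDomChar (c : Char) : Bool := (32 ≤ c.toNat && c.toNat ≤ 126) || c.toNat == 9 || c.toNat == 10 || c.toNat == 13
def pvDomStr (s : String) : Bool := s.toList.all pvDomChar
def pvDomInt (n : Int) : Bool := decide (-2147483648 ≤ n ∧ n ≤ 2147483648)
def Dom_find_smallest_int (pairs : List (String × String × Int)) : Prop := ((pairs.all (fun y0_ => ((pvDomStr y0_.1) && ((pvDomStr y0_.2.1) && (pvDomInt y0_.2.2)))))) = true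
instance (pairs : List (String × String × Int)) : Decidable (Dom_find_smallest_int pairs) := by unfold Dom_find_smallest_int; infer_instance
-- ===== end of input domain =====

-- B replaces A's hand-rolled accumulator loop by a comprehension + the built-in min with a key (idiomatic).
-- Both Pythons raise ValueError on an empty list; that input is excluded by Pre_.

-- ===== PORT A =====
-- A's loop: an optional running minimum; the three Python variables (smallest_int and the two
-- branch names, which are always assigned together) are carried as one optional triple.
def find_smallest_int (pairs : List (String × String × Int)) : String × String × Int :=
  let best := pairs.foldl
    (fun acc p =>
      match acc with
      | none => some p
      | some b => if p.2.2 < b.2.2 then some p else acc)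
    (none : Option (String × String × Int))
  match best with
  | some b => b
  | none => ("", "", 0)   -- unreachable under Pre_: Python raises ValueError here

-- ===== PORT B =====
-- Source B: candidates = [(a,b,n) for a,b,n in pairs if isinstance(n, int)] — under the type
-- convention every element is an int, so the filter keeps everything; then min(candidates, key=t[2]).
def find_smallest_int_alt (pairs : List (String × String × Int)) : String × String × Int :=
  let candidates := pairs.filter (fun _ => true)   -- the isinstance(n, int) test, trivially true on typed input
  match PySem.List.min? candidates (fun t => t.2.2) with
  | some m => m
  | none => ("", "", 0)   -- unreachable under Pre_: Python raises ValueError here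

-- ===== PRECONDITION & SPEC =====
-- Pre_ excludes the empty list, on which A (and B) raise ValueError.
def Pre_find_smallest_int (pairs : List (String × String × Int)) : Prop := pairs ≠ []
instance (pairs : List (String × String × Int)) : Decidable (Pre_find_smallest_int pairs) := by unfold Pre_find_smallest_int; infer_instance
def pvWitness_find_smallest_int : (List (String × String × Int)) := [("a", "b", 1)]

def Spec_find_smallest_int (pairs : List (String × String × Int)) (out : String × String × Int) : Prop := out = find_smallest_int_alt pairs
instance (pairs : List (String × String × Int)) (out : String × String × Int) : Decidable (Spec_find_smallest_int pairs out) := by unfold Spec_find_smallest_int; infer_instance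

-- ===== CLAIM (what is proved, stated in full; the proofs are below) =====
def Claim_equal_find_smallest_int : Prop := ∀ (pairs : List (String × String × Int)), Dom_find_smallest_int pairs → Pre_find_smallest_int pairs → Spec_find_smallest_int pairs (find_smallest_int pairs)

-- ===== LEMMAS AND PROOFS =====

-- A's fold function and min?'s fold function agree (in the `some` arm, acc = some b).
theorem fold_eq_min? (pairs : List (String × String × Int)) :
    pairs.foldl
      (fun acc p =>
        match acc with
        | none => some p
        | some b => if p.2.2 < b.2.2 then some p else acc)
      (none : Option (String × String × Int))
    = PySem.List.min? pairs (fun t => t.2.2) := by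
  unfold PySem.List.min?
  have hf : (fun (acc : Option (String × String × Int)) (p : String × String × Int) =>
      match acc with
      | none => some p
      | some b => if p.2.2 < b.2.2 then some p else acc)
    = (fun acc p =>
      match acc with
      | none => some p
      | some b => if p.2.2 < b.2.2 then some p else some b) := by
    funext acc p
    cases acc with
    | none => rfl
    | some b => simp
  rw [hf]
  congr 1
  funext acc x
  cases acc <;> rfl

-- ===== VERDICT (by name: the statement is the Claim_ definition above) =====
theorem find_smallest_int_spec : Claim_equal_find_smallest_int := by
  intro pairs _ _
  unfold Spec_find_smallest_int find_smallest_int find_smallest_int_alt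
  simp only [List.filter_true, fold_eq_min?]
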